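-- pv_equiv track=rewrite | github.com/makovalab-psu/g4Discovery | src/g4HunterFuncs.py | BaseScore
-- ===== SOURCE A (Python) =====
-- def BaseScore(line):
--         item, liste=0, []
--         #calcule le item de chaque base et la stock dans liste
--         while ( item < len(line)):
--             #a la fin d une sequence il est possible d avoir des GGG dans se cas
--             # on verifie si la secore+1<len(line) car il ya un deuxieme G
--             #et
--             if (item < len(line) and (line[item]=="G" or line[item]=="g")):
--                 liste.append(1)
--                 #print liste
--                 if(item+1< len(line) and (line[item+1]=="G" or line[item+1]=="g")):
--                     liste[item]=2
--                     liste.append(2)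
--                     if (item+2< len(line) and (line[item+2]=="G" or line[item+2]=="g")):
--                         liste[item+1]=3
--                         liste[item]=3
--                         liste.append(3)
--                         if (item+3< len(line) and (line[item+3]=="G" or line[item+3]=="g")):
--                             liste[item]=4
--                             liste[item+1]=4
--                             liste[item+2]=4
--                             liste.append(4)
--                             item=item+1
--                         item=item+1
--                     item=item+1
--                 item=item+1
--                 while(item < len(line) and (line[item]=="G" or line[item]=="g")):
--                         liste.append(4)
--                         item=item+1
--
--             elif (item < len(line) and line[item]!="G" and line[item]!="g" and line[item]!= "C" and line[item]!="c" ):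
--                         liste.append(0)
--                         item=item+1
--
--             elif(item < len(line) and (line[item]=="C" or line[item]=="c")):
--                 liste.append(-1)
--                 if(item+1< len(line) and (line[item+1]=="C" or line[item+1]=="c" )):
--                     liste[item]=-2
--                     liste.append(-2)
--                     if (item+2< len(line) and (line[item+2]=="C" or line[item+2]=="c" )):
--                         liste[item+1]=-3
--                         liste[item]=-3
--                         liste.append(-3)
--                         if (item+3< len(line) and (line[item+3]=="C" or line[item+3]=="c"  )):
--                             liste[item]=-4
--                             liste[item+1]=-4
--                             liste[item+2]=-4
--                             liste.append(-4)
--                             item=item+1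
--                         item=item+1
--                     item=item+1
--                 item=item+1
--                 while(item < len(line) and (line[item]=="C" or line[item]=="c")):
--                     liste.append(-4)
--                     item=item+1
--
--             else:
--                     item=item+1 #la fin du la ligne ou y a des entrers
--         return line, liste
-- ===== SOURCE B (Python) =====
-- def BaseScore(line):
--     # Run-length grouping: one scan finding each maximal G-run / C-run,
--     # emitting min(L,4) (signed) repeated L times.
--     scores = []
--     n = len(line)
--     i = 0
--     while i < n:
--         ch = line[i]
--         if ch in "Gg" or ch in "Cc":
--             run_chars = "Gg" if ch in "Gg" else "Cc"
--             j = i + 1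
--             while j < n and line[j] in run_chars:
--                 j += 1
--             run = j - i
--             val = min(run, 4) if run_chars == "Gg" else -min(run, 4)
--             scores.extend([val] * run)
--             i = j
--         else:
--             scores.append(0)
--             i += 1
--     return line, scores
-- ===== Notes on version B (the rewrite author's own statement) =====
-- stated objective: simpler
-- what changed: Replaced A's four-deep nested if-cascade with back-patching list writes by a single run-length scan: find each maximal G/C run of length L and emit the signed min(L,4) score L times.
import Mathlib
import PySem

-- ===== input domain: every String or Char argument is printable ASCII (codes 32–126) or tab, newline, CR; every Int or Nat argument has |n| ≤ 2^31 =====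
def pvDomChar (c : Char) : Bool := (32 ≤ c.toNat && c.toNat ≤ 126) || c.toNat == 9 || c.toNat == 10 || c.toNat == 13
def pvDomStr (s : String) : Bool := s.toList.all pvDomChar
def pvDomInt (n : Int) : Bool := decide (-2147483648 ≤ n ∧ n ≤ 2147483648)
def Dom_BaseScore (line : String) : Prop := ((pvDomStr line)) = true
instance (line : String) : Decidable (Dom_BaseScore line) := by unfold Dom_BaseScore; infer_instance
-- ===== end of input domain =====

-- B replaces A's nested if-cascade (with back-patching list writes) by a single maximal-run
-- scan emitting the signed min(L,4) score L times per run; simpler, same cost.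
-- Both loops carry a fuel argument (cs.length, each iteration advances the index by ≥ 1)
-- purely as a structural totality guard; it never changes the computation.

-- shared character-class tests (Python: line[i] in "Gg" / "Cc")
def isGc (c : Char) : Bool := c = 'G' || c = 'g'
def isCc (c : Char) : Bool := c = 'C' || c = 'c'

-- ===== PORT A =====
-- inner `while(item < len(line) and line[item] in class): liste.append(v); item+=1`
def gWhileA (cs : List Char) (pred : Char → Bool) (v : Int) :
    Nat → Nat → List Int → Nat × List Int
  | 0, item, liste => (item, liste)
  | fuel + 1, item, liste =>
    if item < cs.length ∧ pred (cs.getD item ' ') then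
      gWhileA cs pred v fuel (item + 1) (liste ++ [v])
    else (item, liste)

-- A's four-deep if cascade (parametric in the class test and the four score values)
def cascadeA (cs : List Char) (pred : Char → Bool) (v1 v2 v3 v4 : Int) (item : Nat)
    (liste : List Int) : Nat × List Int :=
  let liste := liste ++ [v1]
  if item + 1 < cs.length ∧ pred (cs.getD (item + 1) ' ') then
    let liste := (liste.set item v2) ++ [v2]
    if item + 2 < cs.length ∧ pred (cs.getD (item + 2) ' ') then
      let liste := ((liste.set (item + 1) v3).set item v3) ++ [v3]
      if item + 3 < cs.length ∧ pred (cs.getD (item + 3) ' ') then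
        (item + 4, (((liste.set item v4).set (item + 1) v4).set (item + 2) v4) ++ [v4])
      else (item + 3, liste)
    else (item + 2, liste)
  else (item + 1, liste)

def aLoop (cs : List Char) : Nat → Nat → List Int → List Int
  | 0, _, liste => liste
  | fuel + 1, item, liste =>
    if item < cs.length then
      if isGc (cs.getD item ' ') then
        let st := cascadeA cs isGc 1 2 3 4 item liste
        let q := gWhileA cs isGc 4 cs.length st.1 st.2
        aLoop cs fuel q.1 q.2
      else if ¬ isGc (cs.getD item ' ') ∧ ¬ isCc (cs.getD item ' ') then
        aLoop cs fuel (item + 1) (liste ++ [0])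
      else if isCc (cs.getD item ' ') then
        let st := cascadeA cs isCc (-1) (-2) (-3) (-4) item liste
        let q := gWhileA cs isCc (-4) cs.length st.1 st.2
        aLoop cs fuel q.1 q.2
      else
        aLoop cs fuel (item + 1) liste
    else liste

def BaseScore (line : String) : String × List Int :=
  (line, aLoop line.toList line.toList.length 0 [])

-- ===== PORT B =====
-- run_chars = "Gg" if ch in "Gg" else "Cc"
def predOf (c : Char) : Char → Bool := if isGc c then isGc else isCc

-- `while j < n and line[j] in run_chars: j += 1`
def scanB (cs : List Char) (pred : Char → Bool) : Nat → Nat → Nat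
  | 0, j => j
  | fuel + 1, j =>
    if j < cs.length ∧ pred (cs.getD j ' ') then scanB cs pred fuel (j + 1) else j

def bLoop (cs : List Char) : Nat → Nat → List Int → List Int
  | 0, _, acc => acc
  | fuel + 1, i, acc =>
    if i < cs.length then
      let ch := cs.getD i ' '
      if isGc ch || isCc ch then
        let j := scanB cs (predOf ch) cs.length (i + 1)
        let run := j - i
        let v : Int := if isGc ch then min (run : Int) 4 else -(min (run : Int) 4)
        bLoop cs fuel j (acc ++ List.replicate run v)
      else bLoop cs fuel (i + 1) (acc ++ [0])
    else acc

def BaseScore_alt (line : String) : String × List Int :=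
  (line, bLoop line.toList line.toList.length 0 [])

-- ===== PRECONDITION & SPEC =====
def Spec_BaseScore (line : String) (out : String × List Int) : Prop := out = BaseScore_alt line
instance (line : String) (out : String × List Int) : Decidable (Spec_BaseScore line out) := by unfold Spec_BaseScore; infer_instance

-- ===== CLAIM (what is proved, stated in full; the proofs are below) =====
def Claim_equal_BaseScore : Prop := ∀ (line : String), Dom_BaseScore line → Spec_BaseScore line (BaseScore line)

-- ===== LEMMAS AND PROOFS =====

-- the end index of the run starting at j (B's scan with its actual fuel)
def srun (cs : List Char) (pred : Char → Bool) (j : Nat) : Nat :=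
  scanB cs pred cs.length j

theorem scanB_ge (cs : List Char) (pred : Char → Bool) :
    ∀ (f j : Nat), j ≤ scanB cs pred f j := by
  intro f
  induction f with
  | zero => intro j; simp [scanB]
  | succ f ih =>
    intro j
    rw [scanB]
    split
    · exact le_trans (by omega) (ih (j + 1))
    · exact le_refl j

theorem scanB_fuel (cs : List Char) (pred : Char → Bool) :
    ∀ (f g j : Nat), cs.length - j ≤ f → cs.length - j ≤ g →
      scanB cs pred f j = scanB cs pred g j := by
  intro f
  induction f with
  | zero =>
    intro g j hf hg
    have hj : ¬ j < cs.length := by omega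
    cases g with
    | zero => rfl
    | succ g => rw [scanB, scanB, if_neg (by simp [hj])]
  | succ f ih =>
    intro g j hf hg
    cases g with
    | zero =>
      have hj : ¬ j < cs.length := by omega
      rw [scanB, scanB, if_neg (by simp [hj])]
    | succ g =>
      rw [scanB, scanB]
      split
      · next h => exact ih g (j + 1) (by omega) (by omega)
      · rfl

theorem srun_step (cs : List Char) (pred : Char → Bool) (j : Nat)
    (h : j < cs.length ∧ pred (cs.getD j ' ') = true) :
    srun cs pred j = srun cs pred (j + 1) := by
  unfold srun
  obtain ⟨n, hn⟩ : ∃ n, cs.length = n + 1 := ⟨cs.length - 1, by omega⟩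
  rw [hn, scanB, if_pos h]
  rw [← hn]
  exact scanB_fuel cs pred n cs.length (j + 1) (by omega) (by omega)

theorem srun_stop (cs : List Char) (pred : Char → Bool) (j : Nat)
    (h : ¬ (j < cs.length ∧ pred (cs.getD j ' ') = true)) :
    srun cs pred j = j := by
  unfold srun
  rcases Nat.eq_zero_or_pos cs.length with h0 | hpos
  · rw [h0]; rfl
  · obtain ⟨n, hn⟩ : ∃ n, cs.length = n + 1 := ⟨cs.length - 1, by omega⟩
    rw [hn, scanB, if_neg h]

theorem srun_ge (cs : List Char) (pred : Char → Bool) (j : Nat) : j ≤ srun cs pred j :=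
  scanB_ge cs pred cs.length j

theorem gWhileA_eq (cs : List Char) (pred : Char → Bool) (v : Int) :
    ∀ (f item : Nat) (liste : List Int), cs.length - item ≤ f →
      gWhileA cs pred v f item liste
        = (srun cs pred item, liste ++ List.replicate (srun cs pred item - item) v) := by
  intro f
  induction f with
  | zero =>
    intro item liste hf
    have hj : ¬ (item < cs.length ∧ pred (cs.getD item ' ') = true) := by
      intro h; omega
    rw [gWhileA, srun_stop cs pred item hj]
    simp
  | succ f ih =>
    intro item liste hf
    rw [gWhileA]
    split
    · next h =>
      rw [ih (item + 1) (liste ++ [v]) (by omega), srun_step cs pred item h]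
      have hge := srun_ge cs pred (item + 1)
      refine Prod.ext rfl ?_
      have h2 : srun cs pred (item + 1) - item = (srun cs pred (item + 1) - (item + 1)) + 1 := by
        omega
      rw [h2, List.replicate_succ]
      simp
    · next h =>
      rw [srun_stop cs pred item h]
      simp

theorem set_append_len (l : List Int) (m : List Int) (a : Int) (t : Nat) :
    (l ++ m).set (l.length + t) a = l ++ m.set t a := by
  induction l with
  | nil => simp
  | cons x xs ih => simp [Nat.add_right_comm, ih]

-- one outer-loop iteration of A on a class run equals appending the run scores
theorem step_eq (cs : List Char) (pred : Char → Bool) (val : Nat → Int) (item : Nat)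
    (liste : List Int) (hlen : liste.length = item) :
    gWhileA cs pred (val 4) cs.length
        (cascadeA cs pred (val 1) (val 2) (val 3) (val 4) item liste).1
        (cascadeA cs pred (val 1) (val 2) (val 3) (val 4) item liste).2
      = (srun cs pred (item + 1),
         liste ++ List.replicate (srun cs pred (item + 1) - item)
           (val (min (srun cs pred (item + 1) - item) 4))) := by
  have hs1 : ∀ (a b : Int), (liste ++ [a]).set item b = liste ++ [b] := by
    intro a b; have := set_append_len liste [a] b 0; simpa [hlen] using this
  have hs20 : ∀ (a b c : Int), (liste ++ [a, b]).set item c = liste ++ [c, b] := by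
    intro a b c; have := set_append_len liste [a, b] c 0; simpa [hlen] using this
  have hs21 : ∀ (a b c : Int), (liste ++ [a, b]).set (item + 1) c = liste ++ [a, c] := by
    intro a b c; have := set_append_len liste [a, b] c 1; simpa [hlen] using this
  have hs30 : ∀ (a b c d : Int), (liste ++ [a, b, c]).set item d = liste ++ [d, b, c] := by
    intro a b c d; have := set_append_len liste [a, b, c] d 0; simpa [hlen] using this
  have hs31 : ∀ (a b c d : Int), (liste ++ [a, b, c]).set (item + 1) d = liste ++ [a, d, c] := by
    intro a b c d; have := set_append_len liste [a, b, c] d 1; simpa [hlen] using this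
  have hs32 : ∀ (a b c d : Int), (liste ++ [a, b, c]).set (item + 2) d = liste ++ [a, b, d] := by
    intro a b c d; have := set_append_len liste [a, b, c] d 2; simpa [hlen] using this
  unfold cascadeA
  by_cases h1 : item + 1 < cs.length ∧ pred (cs.getD (item + 1) ' ') = true
  · by_cases h2 : item + 2 < cs.length ∧ pred (cs.getD (item + 2) ' ') = true
    · by_cases h3 : item + 3 < cs.length ∧ pred (cs.getD (item + 3) ' ') = true
      · simp only [h1, h2, h3, and_self, if_true, hs1, hs20, hs21, hs30, hs31, hs32,
          List.append_assoc, List.cons_append, List.nil_append]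
        rw [gWhileA_eq cs pred (val 4) cs.length (item + 4) _ (by omega),
            srun_step cs pred (item + 1) h1, srun_step cs pred (item + 2) h2,
            srun_step cs pred (item + 3) h3]
        have hk4 := srun_ge cs pred (item + 4)
        refine Prod.ext rfl ?_
        have hmin : min (srun cs pred (item + 4) - item) 4 = 4 := by omega
        rw [hmin]
        have hrep : srun cs pred (item + 4) - item
            = 4 + (srun cs pred (item + 4) - (item + 4)) := by omega
        rw [hrep, List.replicate_add]
        simp [List.replicate_succ]
      · simp only [h1, h2, h3, and_self, if_true, if_false, hs1, hs20, hs21, hs30, hs31, hs32,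
          List.append_assoc, List.cons_append, List.nil_append]
        rw [gWhileA_eq cs pred (val 4) cs.length (item + 3) _ (by omega),
            srun_step cs pred (item + 1) h1, srun_step cs pred (item + 2) h2,
            srun_stop cs pred (item + 3) h3]
        refine Prod.ext rfl ?_
        have hmin : min (item + 3 - item) 4 = 3 := by omega
        have hrep : item + 3 - item = 3 := by omega
        have hz : item + 3 - (item + 3) = 0 := by omega
        rw [hmin, hrep, hz]
        simp [List.replicate_succ]
    · simp only [h1, h2, and_self, if_true, if_false, hs1, hs20, hs21,
        List.append_assoc, List.cons_append, List.nil_append]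
      rw [gWhileA_eq cs pred (val 4) cs.length (item + 2) _ (by omega),
          srun_step cs pred (item + 1) h1, srun_stop cs pred (item + 2) h2]
      refine Prod.ext rfl ?_
      have hmin : min (item + 2 - item) 4 = 2 := by omega
      have hrep : item + 2 - item = 2 := by omega
      have hz : item + 2 - (item + 2) = 0 := by omega
      rw [hmin, hrep, hz]
      simp [List.replicate_succ]
  · simp only [h1, if_false]
    rw [gWhileA_eq cs pred (val 4) cs.length (item + 1) _ (by omega),
        srun_stop cs pred (item + 1) h1]
    refine Prod.ext rfl ?_
    have hmin : min (item + 1 - item) 4 = 1 := by omega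
    have hrep : item + 1 - item = 1 := by omega
    have hz : item + 1 - (item + 1) = 0 := by omega
    rw [hmin, hrep, hz]
    simp [List.replicate_succ]

-- the two specializations of step_eq, stated in B's value form
theorem step_eq_G (cs : List Char) (item : Nat) (liste : List Int) (hlen : liste.length = item) :
    gWhileA cs isGc 4 cs.length (cascadeA cs isGc 1 2 3 4 item liste).1
        (cascadeA cs isGc 1 2 3 4 item liste).2
      = (srun cs isGc (item + 1),
         liste ++ List.replicate (srun cs isGc (item + 1) - item)
           (min ((srun cs isGc (item + 1) - item : Nat) : Int) 4)) := by
  have h := step_eq cs isGc (fun n => (n : Int)) item liste hlen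
  simpa using h

theorem step_eq_C (cs : List Char) (item : Nat) (liste : List Int) (hlen : liste.length = item) :
    gWhileA cs isCc (-4) cs.length (cascadeA cs isCc (-1) (-2) (-3) (-4) item liste).1
        (cascadeA cs isCc (-1) (-2) (-3) (-4) item liste).2
      = (srun cs isCc (item + 1),
         liste ++ List.replicate (srun cs isCc (item + 1) - item)
           (-(min ((srun cs isCc (item + 1) - item : Nat) : Int) 4))) := by
  have h := step_eq cs isCc (fun n => -(n : Int)) item liste hlen
  simpa using h

theorem bLoop_stop (cs : List Char) (fb i : Nat) (acc : List Int) (h : ¬ i < cs.length) :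
    bLoop cs fb i acc = acc := by
  cases fb with
  | zero => rfl
  | succ fb => rw [bLoop, if_neg h]

theorem loops_eq (cs : List Char) : ∀ (fa fb item : Nat) (liste : List Int),
    cs.length - item ≤ fa → cs.length - item ≤ fb → liste.length = item →
    aLoop cs fa item liste = bLoop cs fb item liste := by
  intro fa
  induction fa with
  | zero =>
    intro fb item liste ha hb hlen
    have h : ¬ item < cs.length := by omega
    rw [aLoop, bLoop_stop cs fb item liste h]
  | succ fa ih =>
    intro fb item liste ha hb hlen
    by_cases hlt : item < cs.length
    · obtain ⟨fb', rfl⟩ : ∃ fb', fb = fb' + 1 := ⟨fb - 1, by omega⟩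
      rw [aLoop, bLoop]
      simp only [hlt, if_true]
      by_cases hG : isGc (cs.getD item ' ')
      · simp only [hG, if_true, Bool.true_or]
        rw [step_eq_G cs item liste hlen]
        simp only [predOf, hG, if_true]
        rw [show scanB cs isGc cs.length (item + 1) = srun cs isGc (item + 1) from rfl]
        set k := srun cs isGc (item + 1) with hk
        have hk1 : item + 1 ≤ k := srun_ge cs isGc (item + 1)
        exact ih fb' k _ (by omega) (by omega) (by simp [hlen]; omega)
      · by_cases hC : isCc (cs.getD item ' ')
        · simp only [hG, hC, Bool.false_or, if_true, not_true, and_false, if_neg, if_false,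
            Bool.not_eq_true, not_false_eq_true, Bool.false_eq_true]
          rw [step_eq_C cs item liste hlen]
          simp only [predOf, hG, if_false, Bool.false_eq_true]
          rw [show scanB cs isCc cs.length (item + 1) = srun cs isCc (item + 1) from rfl]
          set k := srun cs isCc (item + 1) with hk
          have hk1 : item + 1 ≤ k := srun_ge cs isCc (item + 1)
          exact ih fb' k _ (by omega) (by omega) (by simp [hlen]; omega)
        · simp only [hG, hC, Bool.false_or, if_false, and_self, if_pos,
            not_false_eq_true, Bool.false_eq_true]
          exact ih fb' (item + 1) _ (by omega) (by omega) (by simp [hlen])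
    · rw [aLoop, bLoop_stop cs fb item liste hlt, if_neg hlt]

-- ===== VERDICT (by name: the statement is the Claim_ definition above) =====
theorem BaseScore_spec : Claim_equal_BaseScore := by
  intro line _
  unfold Spec_BaseScore BaseScore BaseScore_alt
  rw [loops_eq line.toList line.toList.length line.toList.length 0 [] (by omega) (by omega) rfl]
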